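-- pv_equiv track=rewrite | github.com/atulmishra84/CTComlySphere | integrations/kubernetes_integration.py | _determine_ai_type
-- ===== SOURCE A (Python) =====
-- from typing import Dict, List, Optional, Any
--
-- def _determine_ai_type(labels: Dict[str, str], annotations: Dict[str, str]) -> str:
--     """Determine the specific AI workload type"""
--     combined_metadata = {}
--     if labels:
--         combined_metadata.update(labels)
--     if annotations:
--         combined_metadata.update(annotations)
--
--     for key, value in combined_metadata.items():
--         key_lower = key.lower()
--         value_lower = str(value).lower()
--
--         # Healthcare AI types
--         if any(term in key_lower or term in value_lower for term in ['medical', 'clinical', 'healthcare', 'dicom', 'phi']):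
--             return 'Healthcare AI'
--
--         # Framework-specific types
--         if 'tensorflow' in key_lower or 'tensorflow' in value_lower:
--             return 'TensorFlow AI'
--         elif 'pytorch' in key_lower or 'pytorch' in value_lower:
--             return 'PyTorch AI'
--         elif 'huggingface' in key_lower or 'huggingface' in value_lower:
--             return 'Transformer AI'
--
--         # Function-specific types
--         elif any(term in key_lower or term in value_lower for term in ['inference', 'serving']):
--             return 'AI Inference Service'
--         elif any(term in key_lower or term in value_lower for term in ['training']):
--             return 'AI Training Service'
--         elif any(term in key_lower or term in value_lower for term in ['nlp', 'text']):
--             return 'NLP AI'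
--         elif any(term in key_lower or term in value_lower for term in ['vision', 'image', 'cv']):
--             return 'Computer Vision AI'
--
--     return 'AI Agent'
-- ===== SOURCE B (Python) =====
-- # Flat term -> rule-index map; per entry collect ALL matching rule indices and
-- # return the label of the minimum index (highest priority), instead of an
-- # ordered if/elif chain of grouped tests.
-- TERM_RULE = [
--     ('medical', 0), ('clinical', 0), ('healthcare', 0), ('dicom', 0), ('phi', 0),
--     ('tensorflow', 1), ('pytorch', 2), ('huggingface', 3),
--     ('inference', 4), ('serving', 4), ('training', 5),
--     ('nlp', 6), ('text', 6),
--     ('vision', 7), ('image', 7), ('cv', 7),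
-- ]
-- LABELS = ['Healthcare AI', 'TensorFlow AI', 'PyTorch AI', 'Transformer AI',
--           'AI Inference Service', 'AI Training Service', 'NLP AI', 'Computer Vision AI']
--
-- def _determine_ai_type(labels, annotations):
--     combined = {**(labels or {}), **(annotations or {})}
--     for key, value in combined.items():
--         key_lower = key.lower()
--         value_lower = str(value).lower()
--         hits = [rule for term, rule in TERM_RULE
--                 if term in key_lower or term in value_lower]
--         if hits:
--             return LABELS[min(hits)]
--     return 'AI Agent'
-- ===== Notes on version B (the rewrite author's own statement) =====
-- stated objective: alternative
-- what changed: Replaces A's per-entry if/elif priority chain by a flat term-to-rule-index map: for each metadata entry B collects all matching rule indices in one comprehension and returns LABELS[min(hits)], the minimum index standing for the highest-priority rule, instead of testing grouped conditions in order (one C-level comprehension pass instead of eight generator-based any() calls per entry).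
import Mathlib
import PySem

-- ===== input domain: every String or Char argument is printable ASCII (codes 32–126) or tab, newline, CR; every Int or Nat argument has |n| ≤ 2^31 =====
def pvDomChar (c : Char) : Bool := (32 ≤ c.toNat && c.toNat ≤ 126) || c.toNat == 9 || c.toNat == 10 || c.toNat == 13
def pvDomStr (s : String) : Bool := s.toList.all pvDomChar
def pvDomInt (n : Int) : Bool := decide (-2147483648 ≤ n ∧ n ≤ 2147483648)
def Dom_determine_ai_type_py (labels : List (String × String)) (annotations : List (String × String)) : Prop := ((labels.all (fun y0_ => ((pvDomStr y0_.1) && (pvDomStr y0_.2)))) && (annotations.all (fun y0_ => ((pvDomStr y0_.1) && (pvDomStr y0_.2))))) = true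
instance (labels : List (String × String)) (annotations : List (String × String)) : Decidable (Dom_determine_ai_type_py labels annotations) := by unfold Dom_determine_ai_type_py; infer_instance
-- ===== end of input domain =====

-- B replaces A's per-entry if/elif priority chain by a flat term→rule-index map:
-- per entry it collects ALL matching rule indices and returns the label of the
-- minimum index (objective: alternative); same return value everywhere.

-- ===== PORT A =====
-- the 'for key, value in combined_metadata.items():' loop with its early returns
def pvLoopA : List (String × String) → String
  | [] => "AI Agent"
  | (key, value) :: rest =>
    let key_lower := PySem.Str.lower key
    let value_lower := PySem.Str.lower value   -- str(value) = value: values are str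
    if (["medical", "clinical", "healthcare", "dicom", "phi"]).any
        (fun term => PySem.Str.isIn term key_lower || PySem.Str.isIn term value_lower) then
      "Healthcare AI"
    else if PySem.Str.isIn "tensorflow" key_lower || PySem.Str.isIn "tensorflow" value_lower then
      "TensorFlow AI"
    else if PySem.Str.isIn "pytorch" key_lower || PySem.Str.isIn "pytorch" value_lower then
      "PyTorch AI"
    else if PySem.Str.isIn "huggingface" key_lower || PySem.Str.isIn "huggingface" value_lower then
      "Transformer AI"
    else if (["inference", "serving"]).any
        (fun term => PySem.Str.isIn term key_lower || PySem.Str.isIn term value_lower) then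
      "AI Inference Service"
    else if (["training"]).any
        (fun term => PySem.Str.isIn term key_lower || PySem.Str.isIn term value_lower) then
      "AI Training Service"
    else if (["nlp", "text"]).any
        (fun term => PySem.Str.isIn term key_lower || PySem.Str.isIn term value_lower) then
      "NLP AI"
    else if (["vision", "image", "cv"]).any
        (fun term => PySem.Str.isIn term key_lower || PySem.Str.isIn term value_lower) then
      "Computer Vision AI"
    else
      pvLoopA rest

def determine_ai_type_py (labels : List (String × String)) (annotations : List (String × String)) : String :=
  let combined_metadata : PySem.Dict String String := PySem.Dict.empty
  let combined_metadata := if labels ≠ [] then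
      labels.foldl (fun d kv => d.insert kv.1 kv.2) combined_metadata else combined_metadata
  let combined_metadata := if annotations ≠ [] then
      annotations.foldl (fun d kv => d.insert kv.1 kv.2) combined_metadata else combined_metadata
  pvLoopA combined_metadata.items

-- ===== PORT B =====
-- TERM_RULE: flat term → rule-index association list
def pvTermRule : List (String × Int) :=
  [ ("medical", 0), ("clinical", 0), ("healthcare", 0), ("dicom", 0), ("phi", 0),
    ("tensorflow", 1), ("pytorch", 2), ("huggingface", 3),
    ("inference", 4), ("serving", 4), ("training", 5),
    ("nlp", 6), ("text", 6),
    ("vision", 7), ("image", 7), ("cv", 7) ]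

def pvLabels : List String :=
  [ "Healthcare AI", "TensorFlow AI", "PyTorch AI", "Transformer AI",
    "AI Inference Service", "AI Training Service", "NLP AI", "Computer Vision AI" ]

-- the 'for key, value in combined.items():' loop of Source B; the comprehension is
-- filter+map, 'LABELS[min(hits)]' is min? + pyGet? (exact here: the 'if hits'
-- guard makes min(hits) defined and every rule index lies inside LABELS)
def pvLoopB : List (String × String) → String
  | [] => "AI Agent"
  | (key, value) :: rest =>
    let key_lower := PySem.Str.lower key
    let value_lower := PySem.Str.lower value   -- str(value) = value: values are str
    let hits := (pvTermRule.filter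
        (fun p => PySem.Str.isIn p.1 key_lower || PySem.Str.isIn p.1 value_lower)).map Prod.snd
    if hits = [] then pvLoopB rest
    else (Option.bind (PySem.List.min? hits (fun x => x))
            (fun m => PySem.List.pyGet? pvLabels m)).getD "AI Agent"

def determine_ai_type_py_alt (labels : List (String × String)) (annotations : List (String × String)) : String :=
  let combined := (labels ++ annotations).foldl (fun d kv => d.insert kv.1 kv.2)
      (PySem.Dict.empty : PySem.Dict String String)
  pvLoopB combined.items

-- ===== PRECONDITION & SPEC =====
def Spec_determine_ai_type_py (labels : List (String × String)) (annotations : List (String × String)) (out : String) : Prop := out = determine_ai_type_py_alt labels annotations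
instance (labels : List (String × String)) (annotations : List (String × String)) (out : String) : Decidable (Spec_determine_ai_type_py labels annotations out) := by unfold Spec_determine_ai_type_py; infer_instance

-- ===== CLAIM (what is proved, stated in full; the proofs are below) =====
def Claim_equal_determine_ai_type_py : Prop := ∀ (labels : List (String × String)) (annotations : List (String × String)), Dom_determine_ai_type_py labels annotations → Spec_determine_ai_type_py labels annotations (determine_ai_type_py labels annotations)

-- ===== LEMMAS AND PROOFS =====

-- select the indices whose test bit is true (abstract form of the filter+map)
def pvSel : List (Bool × Int) → List Int
  | [] => []
  | (b, n) :: rest => if b then n :: pvSel rest else pvSel rest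

theorem filter_map_eq_pvSel (p : String × Int → Bool) (l : List (String × Int)) :
    (l.filter p).map Prod.snd = pvSel (l.map (fun x => (p x, x.2))) := by
  induction l with
  | nil => rfl
  | cons a t ih =>
    obtain ⟨s, n⟩ := a
    by_cases h : p (s, n) <;> simp [pvSel, h, ih]

-- A's per-entry branch chain, abstracted over the 16 term tests: rule index
def pvEntryA (b0 b1 b2 b3 b4 b5 b6 b7 b8 b9 b10 b11 b12 b13 b14 b15 : Bool) : Option Int :=
  if b0 || b1 || b2 || b3 || b4 then some 0
  else if b5 then some 1
  else if b6 then some 2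
  else if b7 then some 3
  else if b8 || b9 then some 4
  else if b10 then some 5
  else if b11 || b12 then some 6
  else if b13 || b14 || b15 then some 7
  else none

-- B's per-entry hits/min computation, abstracted over the same 16 tests
def pvEntryB (b0 b1 b2 b3 b4 b5 b6 b7 b8 b9 b10 b11 b12 b13 b14 b15 : Bool) : Option Int :=
  let hits := pvSel [(b0,(0:Int)),(b1,0),(b2,0),(b3,0),(b4,0),(b5,1),(b6,2),(b7,3),
       (b8,4),(b9,4),(b10,5),(b11,6),(b12,6),(b13,7),(b14,7),(b15,7)]
  if hits = [] then none else PySem.List.min? hits (fun x => x)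

set_option maxHeartbeats 8000000 in
theorem pvEntryA_eq_pvEntryB :
    ∀ b0 b1 b2 b3 b4 b5 b6 b7 b8 b9 b10 b11 b12 b13 b14 b15 : Bool,
      pvEntryA b0 b1 b2 b3 b4 b5 b6 b7 b8 b9 b10 b11 b12 b13 b14 b15
      = pvEntryB b0 b1 b2 b3 b4 b5 b6 b7 b8 b9 b10 b11 b12 b13 b14 b15 := by
  decide

theorem pvLoopA_step (key value : String) (rest : List (String × String)) :
    pvLoopA ((key, value) :: rest)
    = (let t := fun s => PySem.Str.isIn s (PySem.Str.lower key) || PySem.Str.isIn s (PySem.Str.lower value)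
       match pvEntryA (t "medical") (t "clinical") (t "healthcare") (t "dicom") (t "phi")
          (t "tensorflow") (t "pytorch") (t "huggingface") (t "inference") (t "serving")
          (t "training") (t "nlp") (t "text") (t "vision") (t "image") (t "cv") with
       | some m => (Option.bind (some m) (fun m => PySem.List.pyGet? pvLabels m)).getD "AI Agent"
       | none => pvLoopA rest) := by
  simp only [pvLoopA, pvEntryA, List.any_cons, List.any_nil, Bool.or_false, Bool.or_assoc]
  split_ifs <;> rfl

theorem pvIfMin (L : List Int) (r d : String) (f : Int → Option String) :
    (if L = [] then r else (Option.bind (PySem.List.min? L (fun x => x)) f).getD d)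
    = (match (if L = [] then (none : Option Int) else PySem.List.min? L (fun x => x)) with
       | some m => (Option.bind (some m) f).getD d
       | none => r) := by
  by_cases h : L = []
  · simp [h]
  · rcases hm : PySem.List.min? L (fun x => x) with _ | m
    · exact absurd ((PySem.List.min?_eq_none_iff L (fun x => x)).mp hm) h
    · simp [h]

theorem pvLoopB_step (key value : String) (rest : List (String × String)) :
    pvLoopB ((key, value) :: rest)
    = (let t := fun s => PySem.Str.isIn s (PySem.Str.lower key) || PySem.Str.isIn s (PySem.Str.lower value)
       match pvEntryB (t "medical") (t "clinical") (t "healthcare") (t "dicom") (t "phi")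
          (t "tensorflow") (t "pytorch") (t "huggingface") (t "inference") (t "serving")
          (t "training") (t "nlp") (t "text") (t "vision") (t "image") (t "cv") with
       | some m => (Option.bind (some m) (fun m => PySem.List.pyGet? pvLabels m)).getD "AI Agent"
       | none => pvLoopB rest) := by
  simp only [pvLoopB, pvEntryB, filter_map_eq_pvSel, pvTermRule, List.map_cons, List.map_nil]
  exact pvIfMin _ _ _ _

-- on each item list, A's chain and B's hits/min scan agree
theorem pvLoopA_eq_pvLoopB (items : List (String × String)) : pvLoopA items = pvLoopB items := by
  induction items with
  | nil => rfl
  | cons kv rest ih =>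
    obtain ⟨key, value⟩ := kv
    simp only [pvLoopA_step, pvLoopB_step, pvEntryA_eq_pvEntryB, ih]

-- the two ways of building combined_metadata produce the same dict
theorem pvCombine_eq (labels annotations : List (String × String)) :
    (let d : PySem.Dict String String := PySem.Dict.empty
     let d := if labels ≠ [] then labels.foldl (fun d kv => d.insert kv.1 kv.2) d else d
     if annotations ≠ [] then annotations.foldl (fun d kv => d.insert kv.1 kv.2) d else d)
    = (labels ++ annotations).foldl (fun d kv => d.insert kv.1 kv.2)
        (PySem.Dict.empty : PySem.Dict String String) := by
  rw [List.foldl_append]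
  by_cases hl : labels = [] <;> by_cases ha : annotations = [] <;>
    simp [hl, ha]

-- ===== VERDICT (by name: the statement is the Claim_ definition above) =====
theorem determine_ai_type_py_spec : Claim_equal_determine_ai_type_py := by
  intro labels annotations _
  unfold Spec_determine_ai_type_py determine_ai_type_py determine_ai_type_py_alt
  rw [← pvCombine_eq]
  exact pvLoopA_eq_pvLoopB _
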